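-- pv_equiv track=rewrite | github.com/DogSoulDev/aresitos | aresitos/modelo/modelo_siem_kali2025.py | _procesar_netstat
-- ===== SOURCE A (Python) =====
-- from typing import Dict, List, Any, Optional, TYPE_CHECKING
--
-- def _procesar_netstat(output: str) -> Dict[str, Any]:
--     """Procesa salida de netstat"""
--     conexiones = {
--         'tcp': 0,
--         'udp': 0,
--         'listening': 0,
--         'established': 0
--     }
--
--     lines = output.split('\n')
--     for line in lines:
--         if 'tcp' in line.lower():
--             conexiones['tcp'] += 1
--             if 'LISTEN' in line:
--                 conexiones['listening'] += 1
--             elif 'ESTABLISHED' in line: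
--                 conexiones['established'] += 1
--         elif 'udp' in line.lower():
--             conexiones['udp'] += 1
--
--     return conexiones
-- ===== SOURCE B (Python) =====
-- def _procesar_netstat(output: str):
--     """Procesa salida de netstat — each count from its own independent scan."""
--     lines = output.split('\n')
--
--     def is_tcp(line):
--         return 'tcp' in line.lower()
--
--     return {
--         'tcp': sum(1 for l in lines if is_tcp(l)),
--         'udp': sum(1 for l in lines if not is_tcp(l) and 'udp' in l.lower()),
--         'listening': sum(1 for l in lines if is_tcp(l) and 'LISTEN' in l),
--         'established': sum(1 for l in lines if is_tcp(l) and 'LISTEN' not in l and 'ESTABLISHED' in l),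
--     }
-- ===== Notes on version B (the rewrite author's own statement) =====
-- stated objective: alternative
-- what changed: Replaces the single accumulating loop with nested elif branches over a mutable dict by four independent single-purpose scans (generator-expression counts), one per counter, with the elif exclusions made explicit negated conditions.
import Mathlib
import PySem

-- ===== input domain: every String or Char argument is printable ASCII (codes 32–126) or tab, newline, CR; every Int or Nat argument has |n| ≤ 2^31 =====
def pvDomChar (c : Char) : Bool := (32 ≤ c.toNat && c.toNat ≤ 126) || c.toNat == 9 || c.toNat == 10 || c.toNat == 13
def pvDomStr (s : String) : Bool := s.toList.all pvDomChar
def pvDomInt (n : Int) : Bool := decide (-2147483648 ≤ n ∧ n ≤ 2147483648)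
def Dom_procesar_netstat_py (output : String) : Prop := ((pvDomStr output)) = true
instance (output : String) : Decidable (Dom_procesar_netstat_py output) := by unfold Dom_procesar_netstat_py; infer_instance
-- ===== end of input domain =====

-- B replaces A's single accumulating loop (nested elif branches over one dict) by four
-- independent single-pass counts, one per key; same O(n) cost, different decomposition.

-- ===== PORT A =====
-- one loop over the lines, updating the four counters of the dict exactly as A's branches do
def pvStepA (d : PySem.Dict String Int) (line : String) : PySem.Dict String Int :=
  if PySem.Str.isIn "tcp" (PySem.Str.lower line) then
    let d1 := d.modify "tcp" 0 (· + 1)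
    if PySem.Str.isIn "LISTEN" line then d1.modify "listening" 0 (· + 1)
    else if PySem.Str.isIn "ESTABLISHED" line then d1.modify "established" 0 (· + 1)
    else d1
  else if PySem.Str.isIn "udp" (PySem.Str.lower line) then d.modify "udp" 0 (· + 1)
  else d

def procesar_netstat_py (output : String) : List (String × Int) :=
  let conexiones : PySem.Dict String Int :=
    PySem.Dict.mk [("tcp", 0), ("udp", 0), ("listening", 0), ("established", 0)]
  let lines := (PySem.Str.split? output "\n").getD []
  (lines.foldl pvStepA conexiones).items

-- ===== PORT B =====
def pvIsTcp (line : String) : Bool := PySem.Str.isIn "tcp" (PySem.Str.lower line)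

def procesar_netstat_py_alt (output : String) : List (String × Int) :=
  let lines := (PySem.Str.split? output "\n").getD []
  [("tcp", (lines.countP pvIsTcp : Int)),
   ("udp", (lines.countP (fun l => !pvIsTcp l && PySem.Str.isIn "udp" (PySem.Str.lower l)) : Int)),
   ("listening", (lines.countP (fun l => pvIsTcp l && PySem.Str.isIn "LISTEN" l) : Int)),
   ("established", (lines.countP (fun l => pvIsTcp l && !PySem.Str.isIn "LISTEN" l && PySem.Str.isIn "ESTABLISHED" l) : Int))]

-- ===== PRECONDITION & SPEC =====
def Spec_procesar_netstat_py (output : String) (out : List (String × Int)) : Prop := out = procesar_netstat_py_alt output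
instance (output : String) (out : List (String × Int)) : Decidable (Spec_procesar_netstat_py output out) := by unfold Spec_procesar_netstat_py; infer_instance

-- ===== CLAIM (what is proved, stated in full; the proofs are below) =====
def Claim_equal_procesar_netstat_py : Prop := ∀ (output : String), Dom_procesar_netstat_py output → Spec_procesar_netstat_py output (procesar_netstat_py output)

-- ===== LEMMAS AND PROOFS =====

-- loop invariant: A's fold over the lines adds B's four independent counts to the counters
theorem pvFold_inv (lines : List String) (t u l e : Int) :
    lines.foldl pvStepA (PySem.Dict.mk [("tcp", t), ("udp", u), ("listening", l), ("established", e)]) =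
    PySem.Dict.mk
      [("tcp", t + (lines.countP pvIsTcp : Int)),
       ("udp", u + (lines.countP (fun s => !pvIsTcp s && PySem.Str.isIn "udp" (PySem.Str.lower s)) : Int)),
       ("listening", l + (lines.countP (fun s => pvIsTcp s && PySem.Str.isIn "LISTEN" s) : Int)),
       ("established", e + (lines.countP (fun s => pvIsTcp s && !PySem.Str.isIn "LISTEN" s && PySem.Str.isIn "ESTABLISHED" s) : Int))] := by
  induction lines generalizing t u l e with
  | nil => simp
  | cons x xs ih =>
    simp only [List.foldl_cons, List.countP_cons]
    by_cases htcp : PySem.Chars.isIn ['t','c','p'] (PySem.Chars.lower x.toList) = true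
    · by_cases hlis : PySem.Chars.isIn ['L','I','S','T','E','N'] x.toList = true
      · rw [show pvStepA (PySem.Dict.mk [("tcp", t), ("udp", u), ("listening", l), ("established", e)]) x =
            PySem.Dict.mk [("tcp", t + 1), ("udp", u), ("listening", l + 1), ("established", e)] from by
          simp [pvStepA, htcp, hlis, PySem.Dict.modify, PySem.Dict.insert, PySem.Dict.getD, PySem.Dict.get?], ih]
        simp [pvIsTcp, htcp, hlis]
        omega
      · by_cases hest : PySem.Chars.isIn ['E','S','T','A','B','L','I','S','H','E','D'] x.toList = true
        · rw [show pvStepA (PySem.Dict.mk [("tcp", t), ("udp", u), ("listening", l), ("established", e)]) x =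
              PySem.Dict.mk [("tcp", t + 1), ("udp", u), ("listening", l), ("established", e + 1)] from by
            simp [pvStepA, htcp, hlis, hest, PySem.Dict.modify, PySem.Dict.insert, PySem.Dict.getD, PySem.Dict.get?], ih]
          simp [pvIsTcp, htcp, hlis, hest]
          omega
        · rw [show pvStepA (PySem.Dict.mk [("tcp", t), ("udp", u), ("listening", l), ("established", e)]) x =
              PySem.Dict.mk [("tcp", t + 1), ("udp", u), ("listening", l), ("established", e)] from by
            simp [pvStepA, htcp, hlis, hest, PySem.Dict.modify, PySem.Dict.insert, PySem.Dict.getD, PySem.Dict.get?], ih]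
          simp [pvIsTcp, htcp, hlis, hest]
          omega
    · by_cases hudp : PySem.Chars.isIn ['u','d','p'] (PySem.Chars.lower x.toList) = true
      · rw [show pvStepA (PySem.Dict.mk [("tcp", t), ("udp", u), ("listening", l), ("established", e)]) x =
            PySem.Dict.mk [("tcp", t), ("udp", u + 1), ("listening", l), ("established", e)] from by
          simp [pvStepA, htcp, hudp, PySem.Dict.modify, PySem.Dict.insert, PySem.Dict.getD, PySem.Dict.get?], ih]
        simp [pvIsTcp, htcp, hudp]
        omega
      · rw [show pvStepA (PySem.Dict.mk [("tcp", t), ("udp", u), ("listening", l), ("established", e)]) x =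
            PySem.Dict.mk [("tcp", t), ("udp", u), ("listening", l), ("established", e)] from by
          simp [pvStepA, htcp, hudp], ih]
        simp [pvIsTcp, htcp, hudp]

-- ===== VERDICT (by name: the statement is the Claim_ definition above) =====
theorem procesar_netstat_py_spec : Claim_equal_procesar_netstat_py := by
  intro output _
  unfold Spec_procesar_netstat_py
  dsimp only [procesar_netstat_py, procesar_netstat_py_alt]
  rw [pvFold_inv]
  simp
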